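-- pv_equiv track=rewrite | github.com/victorsimrbt/britishinformaticsolympiad | 2007/q3/q3.py | chart_growth
-- ===== SOURCE A (Python) =====
-- def a_growth(n):
--     if n == 1:
--         return 1
--     if n == 2:
--         return 2
--     return a_growth(n-1)+a_growth(n-2)
--
-- def b_growth(n):
--     if n == 1 or n == 2:
--         return 1
--     return b_growth(n-1)+b_growth(n-2)
--
-- def chart_growth(text,steps):
--     growths = []
--     for char in text:
--         if char == "A":
--             growths.append(a_growth(steps))
--         elif char == "B":
--             growths.append(b_growth(steps))
--         else:
--             growths.append(2*steps)
--     return growths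
-- ===== SOURCE B (Python) =====
-- def chart_growth(text, steps):
--     pair = (0, 0)  # only used when text contains 'A'/'B'
--     if "A" in text or "B" in text:
--         memo = {1: (1, 1), 2: (2, 1)}
--         for n in range(3, steps + 1):
--             pa = memo[n - 1]
--             pb = memo[n - 2]
--             memo[n] = (pa[0] + pb[0], pa[1] + pb[1])
--         pair = memo[steps]  # KeyError for steps <= 0 (A recurses without bound there)
--     return [pair[0] if c == "A" else pair[1] if c == "B" else 2 * steps for c in text]
-- ===== Notes on version B (the rewrite author's own statement) =====
-- stated objective: alternative
-- what changed: B computes both Fibonacci-like values once with a bottom-up memo table (one shared loop over 3..steps) instead of naive recursion per character, then maps the characters over the cached pair.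
import Mathlib
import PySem

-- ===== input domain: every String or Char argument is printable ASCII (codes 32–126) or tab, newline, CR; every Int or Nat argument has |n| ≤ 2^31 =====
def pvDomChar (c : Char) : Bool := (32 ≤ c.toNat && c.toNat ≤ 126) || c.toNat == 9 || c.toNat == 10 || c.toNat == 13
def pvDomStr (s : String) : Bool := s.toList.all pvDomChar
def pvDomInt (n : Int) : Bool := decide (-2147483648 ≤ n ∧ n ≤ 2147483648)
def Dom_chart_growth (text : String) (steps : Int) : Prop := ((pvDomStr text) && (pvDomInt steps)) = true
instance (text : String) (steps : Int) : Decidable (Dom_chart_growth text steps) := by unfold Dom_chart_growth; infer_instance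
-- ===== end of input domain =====

-- B computes both Fibonacci-like values once with a bottom-up memo table instead of
-- naive recursion per character (alternative decomposition; no speed claim).


-- ===== PORT A =====
-- a_growth / b_growth: Python recurses on n; it terminates exactly for n ≥ 1, and for
-- n ≤ 0 it raises RecursionError (those inputs are outside Pre_). We transcribe the
-- recursion through n.toNat, which is exact for every n ≥ 1.
def a_growthN : Nat → Int
  | 0 => 0          -- unreachable under Pre_ (Python raises RecursionError for n ≤ 0)
  | 1 => 1
  | 2 => 2
  | (n+3) => a_growthN (n+2) + a_growthN (n+1)

def a_growth (n : Int) : Int := a_growthN n.toNat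

def b_growthN : Nat → Int
  | 0 => 0          -- unreachable under Pre_
  | 1 => 1
  | 2 => 1
  | (n+3) => b_growthN (n+2) + b_growthN (n+1)

def b_growth (n : Int) : Int := b_growthN n.toNat

def chart_growth (text : String) (steps : Int) : List Int :=
  text.toList.foldl
    (fun growths char =>
      if char == 'A' then growths ++ [a_growth steps]
      else if char == 'B' then growths ++ [b_growth steps]
      else growths ++ [2 * steps])
    []

-- ===== PORT B =====
-- The Python dict lookups memo[n-1], memo[n-2], memo[steps] always hit inside Pre_;
-- the getD default (0, 0) is reached exactly where Python raises KeyError (outside Pre_).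
def chart_growth_alt (text : String) (steps : Int) : List Int :=
  let pair : Int × Int :=
    if text.toList.contains 'A' || text.toList.contains 'B' then
      let memo := (PySem.List.pyRange 3 (steps + 1) 1).foldl
        (fun (m : PySem.Dict Int (Int × Int)) n =>
          let pa := m.getD (n - 1) (0, 0)
          let pb := m.getD (n - 2) (0, 0)
          m.insert n (pa.1 + pb.1, pa.2 + pb.2))
        ((PySem.Dict.empty.insert 1 (1, 1)).insert 2 (2, 1))
      memo.getD steps (0, 0)
    else (0, 0)
  text.toList.map (fun c =>
    if c == 'A' then pair.1 else if c == 'B' then pair.2 else 2 * steps)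

-- ===== PRECONDITION & SPEC =====
-- Pre_ excludes exactly the inputs on which A raises RecursionError (and B KeyError):
-- steps ≤ 0 while text contains 'A' or 'B'.
def Pre_chart_growth (text : String) (steps : Int) : Prop :=
  1 ≤ steps ∨ ('A' ∉ text.toList ∧ 'B' ∉ text.toList)
instance (text : String) (steps : Int) : Decidable (Pre_chart_growth text steps) := by
  unfold Pre_chart_growth; infer_instance

def pvWitness_chart_growth : String × Int := ("ABx", 5)

def Spec_chart_growth (text : String) (steps : Int) (out : List Int) : Prop := out = chart_growth_alt text steps
instance (text : String) (steps : Int) (out : List Int) : Decidable (Spec_chart_growth text steps out) := by unfold Spec_chart_growth; infer_instance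

-- ===== CLAIM =====
def Claim_equal_chart_growth : Prop := ∀ (text : String) (steps : Int), Dom_chart_growth text steps → Pre_chart_growth text steps → Spec_chart_growth text steps (chart_growth text steps)

-- ===== LEMMAS AND PROOFS =====

-- A's foldl-append loop is a map.
theorem foldA_eq_map (steps : Int) :
    ∀ (l : List Char) (acc : List Int),
      l.foldl (fun growths char =>
          if char == 'A' then growths ++ [a_growth steps]
          else if char == 'B' then growths ++ [b_growth steps]
          else growths ++ [2 * steps]) acc =
        acc ++ l.map (fun c =>
          if c == 'A' then a_growth steps
          else if c == 'B' then b_growth steps else 2 * steps) := by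
  intro l
  induction l with
  | nil => simp
  | cons c l ih =>
      intro acc
      simp only [List.foldl, List.map]
      split_ifs <;> rw [ih] <;> simp

theorem chart_growth_eq_map (text : String) (steps : Int) :
    chart_growth text steps =
      text.toList.map (fun c =>
        if c == 'A' then a_growth steps
        else if c == 'B' then b_growth steps else 2 * steps) := by
  unfold chart_growth
  rw [foldA_eq_map steps text.toList []]
  simp

-- B's memo loop body, named for the lemmas.
def memoStep (m : PySem.Dict Int (Int × Int)) (n : Int) : PySem.Dict Int (Int × Int) :=
  let pa := m.getD (n - 1) (0, 0)
  let pb := m.getD (n - 2) (0, 0)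
  m.insert n (pa.1 + pb.1, pa.2 + pb.2)

def memoBase : PySem.Dict Int (Int × Int) :=
  (PySem.Dict.empty.insert 1 (1, 1)).insert 2 (2, 1)

-- Invariant: after k iterations the memo holds the growth pair for every 1 ≤ n ≤ k+2.
theorem memo_invariant : ∀ (k : Nat) (n : Int), 1 ≤ n → n ≤ (k : Int) + 2 →
    ((PySem.List.pyRange 3 ((k : Int) + 3) 1).foldl memoStep memoBase).getD n (0, 0)
      = (a_growthN n.toNat, b_growthN n.toNat) := by
  intro k
  induction k with
  | zero =>
      intro n h1 h2
      rw [PySem.List.pyRange_one_eq_nil (by omega)]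
      have : n = 1 ∨ n = 2 := by omega
      rcases this with rfl | rfl <;> decide
  | succ k ih =>
      intro n h1 h2
      have hrange : PySem.List.pyRange 3 ((↑(k + 1) : Int) + 3) 1
          = PySem.List.pyRange 3 ((k : Int) + 3) 1 ++ [(k : Int) + 3] := by
        have h := PySem.List.pyRange_one_succ_right (a := 3) (b := (k : Int) + 3) (by omega)
        push_cast
        convert h using 2
      rw [hrange, List.foldl_append]
      simp only [List.foldl]
      set M := (PySem.List.pyRange 3 ((k : Int) + 3) 1).foldl memoStep memoBase with hM
      have hpa : M.getD ((k : Int) + 3 - 1) (0, 0) = (a_growthN (k + 2), b_growthN (k + 2)) := by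
        have := ih ((k : Int) + 2) (by omega) (by omega)
        have ht : ((k : Int) + 2).toNat = k + 2 := by omega
        rw [ht] at this
        have he : (k : Int) + 3 - 1 = (k : Int) + 2 := by ring
        rw [he, this]
      have hpb : M.getD ((k : Int) + 3 - 2) (0, 0) = (a_growthN (k + 1), b_growthN (k + 1)) := by
        have := ih ((k : Int) + 1) (by omega) (by omega)
        have ht : ((k : Int) + 1).toNat = k + 1 := by omega
        rw [ht] at this
        have he : (k : Int) + 3 - 2 = (k : Int) + 1 := by ring
        rw [he, this]
      show (memoStep M ((k : Int) + 3)).getD n (0, 0) = _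
      unfold memoStep
      simp only [hpa, hpb]
      rw [PySem.Dict.getD_insert]
      by_cases hn : n = (k : Int) + 3
      · subst hn
        have ht : ((k : Int) + 3).toNat = k + 3 := by omega
        rw [if_pos rfl, ht]
        show _ = (a_growthN (k + 3), b_growthN (k + 3))
        simp [a_growthN, b_growthN]
      · rw [if_neg hn]
        exact ih n h1 (by push_cast at h2; omega)

-- The final lookup memo[steps] returns the growth pair, for every steps ≥ 1.
theorem memo_final (steps : Int) (hs : 1 ≤ steps) :
    ((PySem.List.pyRange 3 (steps + 1) 1).foldl memoStep memoBase).getD steps (0, 0)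
      = (a_growth steps, b_growth steps) := by
  unfold a_growth b_growth
  by_cases h2 : 2 ≤ steps
  · have hk : steps = ((steps - 2).toNat : Int) + 2 := by omega
    have hr : steps + 1 = ((steps - 2).toNat : Int) + 3 := by omega
    rw [hr]
    have := memo_invariant (steps - 2).toNat steps hs (by omega)
    exact this
  · have h1 : steps = 1 := by omega
    subst h1
    decide

theorem chart_growth_spec' (text : String) (steps : Int)
    (hpre : Pre_chart_growth text steps) :
    chart_growth text steps = chart_growth_alt text steps := by
  rw [chart_growth_eq_map]
  unfold chart_growth_alt
  by_cases hab : (text.toList.contains 'A' || text.toList.contains 'B') = true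
  · have hs : 1 ≤ steps := by
      rcases hpre with hs | ⟨hA, hB⟩
      · exact hs
      · exfalso
        rcases Bool.or_eq_true_iff.mp hab with h | h
        · exact hA (List.contains_iff_mem.mp h)
        · exact hB (List.contains_iff_mem.mp h)
    simp only [hab, if_pos]
    rw [show (fun (m : PySem.Dict Int (Int × Int)) n =>
          let pa := m.getD (n - 1) (0, 0)
          let pb := m.getD (n - 2) (0, 0)
          m.insert n (pa.1 + pb.1, pa.2 + pb.2)) = memoStep from rfl,
        show ((PySem.Dict.empty.insert 1 (1, 1)).insert 2 (2, 1) :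
          PySem.Dict Int (Int × Int)) = memoBase from rfl,
        memo_final steps hs]
  · simp only [hab, if_neg, Bool.false_eq_true, not_false_iff]
    simp only [Bool.or_eq_true, List.contains_iff_mem, not_or] at hab
    obtain ⟨hA, hB⟩ := hab
    apply List.map_congr_left
    intro c hc
    have hcA : (c == 'A') = false := by
      cases hca : (c == 'A') <;> simp_all
    have hcB : (c == 'B') = false := by
      cases hcb : (c == 'B') <;> simp_all
    simp [hcA, hcB]

-- ===== VERDICT =====
theorem chart_growth_spec : Claim_equal_chart_growth := by
  intro text steps _ hpre
  exact chart_growth_spec' text steps hpre
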